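-- pv_equiv track=rewrite | github.com/musagani05/Melchizedek-Medical-RAG | archive/multimodal_indexer.py | get_heading_for_page
-- ===== SOURCE A (Python) =====
-- def get_heading_for_page(toc, page_num):
--     """
--     Tentukan chapter dan section untuk halaman tertentu berdasar TOC.
--     """
--     chapter = None
--     section = None
--     for level, title, pg in toc:
--         if pg <= page_num:
--             if level == 1:
--                 chapter = title
--             elif level == 2:
--                 section = title
--         else:
--             break
--     return chapter or "–", section or "–"
-- ===== SOURCE B (Python) =====
-- from itertools import takewhile
--
-- def get_heading_for_page(toc, page_num):
--     prefix = list(takewhile(lambda t: t[2] <= page_num, toc))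
--     chapter = next((title for lvl, title, _ in reversed(prefix) if lvl == 1), None)
--     section = next((title for lvl, title, _ in reversed(prefix) if lvl == 2), None)
--     return chapter or "–", section or "–"
-- ===== Notes on version B (the rewrite author's own statement) =====
-- stated objective: alternative
-- what changed: Replaces the single forward accumulating loop (mutating chapter/section as it scans) with a takewhile prefix followed by two backward searches for the most recent level-1 and level-2 headings.
import Mathlib
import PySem

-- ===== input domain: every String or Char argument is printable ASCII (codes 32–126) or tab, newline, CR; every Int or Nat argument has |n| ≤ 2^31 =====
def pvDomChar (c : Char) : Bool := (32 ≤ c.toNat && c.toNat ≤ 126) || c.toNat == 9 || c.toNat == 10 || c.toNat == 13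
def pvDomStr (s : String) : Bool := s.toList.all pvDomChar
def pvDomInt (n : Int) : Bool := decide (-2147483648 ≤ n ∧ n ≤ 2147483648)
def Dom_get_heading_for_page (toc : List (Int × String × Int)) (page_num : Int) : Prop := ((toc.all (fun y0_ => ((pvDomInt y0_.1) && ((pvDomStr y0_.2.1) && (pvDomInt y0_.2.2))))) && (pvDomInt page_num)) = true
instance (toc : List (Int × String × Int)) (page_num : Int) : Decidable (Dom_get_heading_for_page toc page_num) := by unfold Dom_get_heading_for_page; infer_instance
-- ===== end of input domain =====

-- B replaces A's single forward accumulating loop by a takewhile pref plus two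
-- backward searches (one per heading level); same cost, different decomposition.

-- Python's `x or "–"` on an Optional[str]: None and "" both give "–"
def pvOrDash (o : Option String) : String :=
  match o with
  | none => "–"
  | some t => if t == "" then "–" else t

-- ===== PORT A =====
-- forward loop carrying mutable chapter/section, breaking at the first pg > page_num
def loopA (page_num : Int) : List (Int × String × Int) → Option String → Option String → Option String × Option String
  | [], ch, se => (ch, se)
  | (level, title, pg) :: rest, ch, se =>
    if pg ≤ page_num then
      if level = 1 then loopA page_num rest (some title) se
      else if level = 2 then loopA page_num rest ch (some title)
      else loopA page_num rest ch se
    else (ch, se)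

def get_heading_for_page (toc : List (Int × String × Int)) (page_num : Int) : String × String :=
  let r := loopA page_num toc none none
  (pvOrDash r.1, pvOrDash r.2)

-- ===== PORT B =====
def get_heading_for_page_alt (toc : List (Int × String × Int)) (page_num : Int) : String × String :=
  let pref := toc.takeWhile (fun t => t.2.2 ≤ page_num)
  let chapter := (pref.reverse.find? (fun t => t.1 == 1)).map (fun t => t.2.1)
  let sect := (pref.reverse.find? (fun t => t.1 == 2)).map (fun t => t.2.1)
  (pvOrDash chapter, pvOrDash sect)

-- ===== PRECONDITION & SPEC =====
def Spec_get_heading_for_page (toc : List (Int × String × Int)) (page_num : Int) (out : String × String) : Prop := out = get_heading_for_page_alt toc page_num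
instance (toc : List (Int × String × Int)) (page_num : Int) (out : String × String) : Decidable (Spec_get_heading_for_page toc page_num out) := by unfold Spec_get_heading_for_page; infer_instance

-- ===== CLAIM (what is proved, stated in full; the proofs are below) =====
def Claim_equal_get_heading_for_page : Prop := ∀ (toc : List (Int × String × Int)) (page_num : Int), Dom_get_heading_for_page toc page_num → Spec_get_heading_for_page toc page_num (get_heading_for_page toc page_num)

-- ===== LEMMAS AND PROOFS =====

theorem loopA_eq (page_num : Int) (toc : List (Int × String × Int)) :
    ∀ ch se, loopA page_num toc ch se =
      ((((toc.takeWhile (fun t => t.2.2 ≤ page_num)).reverse.find? (fun t => t.1 == 1)).map (fun t => t.2.1)).or ch,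
       (((toc.takeWhile (fun t => t.2.2 ≤ page_num)).reverse.find? (fun t => t.1 == 2)).map (fun t => t.2.1)).or se) := by
  induction toc with
  | nil => intro ch se; simp [loopA]
  | cons hd tl ih =>
    intro ch se
    obtain ⟨level, title, pg⟩ := hd
    by_cases hle : pg ≤ page_num
    · by_cases h1 : level = 1
      · simp [loopA, hle, h1, ih, List.find?_append, Option.some_or, Option.or_none]
        cases List.find? (fun t => t.1 == 1)
            (List.takeWhile (fun t : Int × String × Int => decide (t.2.2 ≤ page_num)) tl).reverse <;> simp
      · by_cases h2 : level = 2
        · simp [loopA, hle, h2, ih, List.find?_append, Option.some_or, Option.or_none]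
          cases List.find? (fun t => t.1 == 2)
              (List.takeWhile (fun t : Int × String × Int => decide (t.2.2 ≤ page_num)) tl).reverse <;> simp
        · simp [loopA, hle, h1, h2, ih, List.find?_append, Option.or_none]
    · simp [loopA, hle]

-- ===== VERDICT (by name: the statement is the Claim_ definition above) =====
theorem get_heading_for_page_spec : Claim_equal_get_heading_for_page := by
  intro toc page_num _
  unfold Spec_get_heading_for_page get_heading_for_page get_heading_for_page_alt
  simp [loopA_eq, Option.or_none]
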